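-- pv_equiv track=rewrite | github.com/IgnasVanagas/Training_Plans | backend/app/production_demo_seed.py | sanitize_alias_prefix
-- ===== SOURCE A (Python) =====
-- def sanitize_alias_prefix(value: str) -> str:
--     raw = (value or "").strip().lower()
--     cleaned: list[str] = []
--     previous_dash = False
--     for char in raw:
--         if char.isalnum():
--             cleaned.append(char)
--             previous_dash = False
--             continue
--         if char in {"-", "_", ".", " ", "/"} and not previous_dash:
--             cleaned.append("-")
--             previous_dash = True
--     normalized = "".join(cleaned).strip("-")
--     if not normalized:
--         raise ValueError("Alias prefix must include at least one alphanumeric character")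
--     return normalized[:40]
-- ===== SOURCE B (Python) =====
-- def sanitize_alias_prefix(value: str) -> str:
--     text = (value or "").lower()
--     kept = "".join(
--         c if c.isalnum() else " "
--         for c in text
--         if c.isalnum() or c in "-_. /"
--     )
--     words = kept.split()
--     if not words:
--         raise ValueError("Alias prefix must include at least one alphanumeric character")
--     return "-".join(words)[:40]
-- ===== Notes on version B (the rewrite author's own statement) =====
-- stated objective: simpler
-- what changed: Removed the strip() pre-pass and the stateful previous_dash flag loop plus trailing strip('-'): B classifies each char once (alnum kept, separator mapped to a space, other dropped) and a single whitespace split()/join collapses runs and trims both ends.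
-- outside the precondition, e.g. on sanitize_alias_prefix('-'): A raises ValueError, B raises ValueError
import Mathlib
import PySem

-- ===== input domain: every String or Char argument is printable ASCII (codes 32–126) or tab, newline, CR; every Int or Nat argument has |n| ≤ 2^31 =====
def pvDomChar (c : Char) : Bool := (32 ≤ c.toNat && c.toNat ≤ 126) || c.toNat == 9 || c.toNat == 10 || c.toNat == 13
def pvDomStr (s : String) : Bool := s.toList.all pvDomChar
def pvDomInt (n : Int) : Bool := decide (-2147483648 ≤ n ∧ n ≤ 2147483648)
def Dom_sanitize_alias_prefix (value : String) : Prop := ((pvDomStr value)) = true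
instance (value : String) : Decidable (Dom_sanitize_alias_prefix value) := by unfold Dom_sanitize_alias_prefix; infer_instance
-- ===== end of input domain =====

-- B drops the strip() pass and A's previous_dash flag loop: it classifies each char once
-- (alnum kept, separator → space, other dropped) and lets a whitespace split() collapse and
-- trim the runs (objective: simpler).

-- ===== PORT A =====
def sanitize_alias_prefix (value : String) : String :=
  let raw := PySem.Chars.lower (PySem.Chars.strip value.toList)
  let res := raw.foldl (fun (st : List Char × Bool) char =>
    if PySem.Chars.isalnum char then (st.1 ++ [char], false)
    else if (['-', '_', '.', ' ', '/'].contains char && !st.2) then (st.1 ++ ['-'], true)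
    else st) ([], false)
  let normalized := PySem.Chars.stripChars res.1 ['-']
  String.ofList (PySem.List.slice normalized none (some 40))

-- ===== PORT B =====
def sanitize_alias_prefix_alt (value : String) : String :=
  let text := PySem.Chars.lower value.toList
  let kept := text.filterMap (fun c =>
    if PySem.Chars.isalnum c then some c
    else if ['-', '_', '.', ' ', '/'].contains c then some ' ' else none)
  let words := PySem.Chars.split₀ kept
  String.ofList (PySem.List.slice (PySem.Chars.join ['-'] words) none (some 40))

-- ===== PRECONDITION & SPEC =====
-- Pre_ excludes exactly the inputs (no alphanumeric character at all) on which Python A raises ValueError (and B raises the same).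
def Pre_sanitize_alias_prefix (value : String) : Prop :=
  value.toList.any PySem.Chars.isalnum = true
instance (value : String) : Decidable (Pre_sanitize_alias_prefix value) := by
  unfold Pre_sanitize_alias_prefix; infer_instance
def pvWitness_sanitize_alias_prefix : String := "My Plan_2!"

def Spec_sanitize_alias_prefix (value : String) (out : String) : Prop := out = sanitize_alias_prefix_alt value
instance (value : String) (out : String) : Decidable (Spec_sanitize_alias_prefix value out) := by unfold Spec_sanitize_alias_prefix; infer_instance

-- ===== CLAIM (what is proved, stated in full; the proofs are below) =====
def Claim_equal_sanitize_alias_prefix : Prop := ∀ (value : String), Dom_sanitize_alias_prefix value → Pre_sanitize_alias_prefix value → Spec_sanitize_alias_prefix value (sanitize_alias_prefix value)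

-- ===== LEMMAS AND PROOFS =====

-- classification of one char: A's transformed output / B's classification
def pvTr (c : Char) : List Char :=
  if PySem.Chars.isalnum c then [c]
  else if ['-', '_', '.', ' ', '/'].contains c then ['-'] else []

def pvCl (c : Char) : Option Char :=
  if PySem.Chars.isalnum c then some c
  else if ['-', '_', '.', ' ', '/'].contains c then some ' ' else none

-- renaming dashes to spaces
def pvSig (c : Char) : Char := if c = '-' then ' ' else c

-- A's loop output as a function of the transformed stream: collapse dash runs
def pvSquash : Bool → List Char → List Char
  | _, [] => []
  | prev, c :: t =>
    if c = '-' then (if prev then pvSquash true t else '-' :: pvSquash true t)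
    else c :: pvSquash false t

-- split('-') with accumulator
def pvMsplit : List Char → List Char → List (List Char)
  | [], cur => [cur.reverse]
  | c :: t, cur => if c = '-' then cur.reverse :: pvMsplit t [] else pvMsplit t (c :: cur)

-- whitespace split() with accumulator (model of PySem.Chars.split₀.go)
def pvW : List Char → List Char → List (List Char)
  | [], cur => if cur = [] then [] else [cur.reverse]
  | c :: t, cur =>
    if PySem.Chars.isspace c then (if cur = [] then pvW t [] else cur.reverse :: pvW t [])
    else pvW t (c :: cur)

-- the common reference machine: pending separator / already started a word
def pvRef : Bool → Bool → List Char → List Char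
  | _, _, [] => []
  | pend, started, c :: t =>
    if c = '-' then pvRef true started t
    else if pend && started then '-' :: c :: pvRef false true t
    else c :: pvRef false true t

def pvD (c : Char) : Bool := ['-'].contains c
def pvRstrip (s : List Char) : List Char := (List.dropWhile pvD s.reverse).reverse
def pvJ (parts : List (List Char)) : List Char :=
  ((parts.filter (fun p => p ≠ [])).map (fun w => '-' :: w)).flatten

theorem pv_alnum_ne_dash {c : Char} (h : PySem.Chars.isalnum c = true) : c ≠ '-' := by
  intro he; subst he; exact absurd h (by decide)

theorem pv_alnum_not_space {c : Char} (h : PySem.Chars.isalnum c = true) :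
    PySem.Chars.isspace c = false := by
  revert h
  simp only [PySem.Chars.isalnum, PySem.Chars.isalpha, PySem.Chars.isupper, PySem.Chars.islower,
    PySem.Chars.isdigit, PySem.Chars.isspace, Char.le_def, UInt32.le_iff_toNat_le,
    Char.reduceVal, UInt32.reduceToNat, Char.toNat, Bool.or_eq_true,
    Bool.and_eq_true, decide_eq_true_eq, Bool.or_eq_false_iff, Bool.and_eq_false_iff,
    decide_eq_false_iff_not, not_le]
  intro h
  omega

theorem pv_space_not_alnum {c : Char} (h : PySem.Chars.isspace c = true) :
    PySem.Chars.isalnum c = false := by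
  cases ha : PySem.Chars.isalnum c
  · rfl
  · exact absurd h (by simp [pv_alnum_not_space ha])

theorem pv_space_lower {c : Char} (h : PySem.Chars.isspace c = true) :
    PySem.Chars.lowerChar c = c := by
  unfold PySem.Chars.lowerChar
  have hu : PySem.Chars.isupper c = false := by
    revert h
    simp only [PySem.Chars.isupper, PySem.Chars.isspace, Char.le_def, UInt32.le_iff_toNat_le,
      Char.reduceVal, UInt32.reduceToNat, Char.toNat, Bool.or_eq_true, Bool.and_eq_true,
      decide_eq_true_eq, Bool.and_eq_false_iff, decide_eq_false_iff_not, not_le]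
    intro h
    omega
  simp [hu]

-- a separator classified while its char is whitespace can only yield a space or nothing
theorem pv_cl_space {c : Char} (h : PySem.Chars.isspace c = true) :
    pvCl c = none ∨ pvCl c = some ' ' := by
  unfold pvCl
  rw [pv_space_not_alnum h]
  cases hs : (['-', '_', '.', ' ', '/'].contains c)
  · left; simp
  · right; simp

-- ---- A side (flag loop → squash → reference machine), as in the port of A ----

theorem pv_fold (cs : List Char) : ∀ (acc : List Char) (prev : Bool),
    (cs.foldl (fun (st : List Char × Bool) char =>
      if PySem.Chars.isalnum char then (st.1 ++ [char], false)
      else if (['-', '_', '.', ' ', '/'].contains char && !st.2) then (st.1 ++ ['-'], true)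
      else st) (acc, prev)).1 = acc ++ pvSquash prev (cs.flatMap pvTr) := by
  induction cs with
  | nil => intro acc prev; simp [pvSquash]
  | cons c cs ih =>
    intro acc prev
    by_cases ha : PySem.Chars.isalnum c = true
    · simp only [List.foldl_cons, List.flatMap_cons, pvTr, ha, if_pos]
      rw [ih]
      simp [pvSquash, pv_alnum_ne_dash ha]
    · by_cases hs : (['-', '_', '.', ' ', '/'].contains c) = true
      · cases prev with
        | false =>
          simp only [List.foldl_cons, List.flatMap_cons, pvTr, ha, hs, if_pos,
            Bool.not_false, Bool.and_true]
          rw [ih]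
          simp [pvSquash]
        | true =>
          simp only [List.foldl_cons, List.flatMap_cons, pvTr, ha, hs, if_pos,
            Bool.not_true, Bool.and_false, Bool.false_eq_true, if_false]
          rw [ih]
          simp [pvSquash]
      · simp only [List.foldl_cons, List.flatMap_cons, pvTr, ha, hs,
          Bool.false_and, Bool.false_eq_true, if_false]
        rw [ih]
        simp [pvSquash]

theorem pv_rstrip_cons {c : Char} (hc : c ≠ '-') (s : List Char) :
    pvRstrip (c :: s) = c :: pvRstrip s := by
  unfold pvRstrip
  rw [List.reverse_cons]
  rw [List.dropWhile_append]
  by_cases h : List.dropWhile pvD s.reverse = []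
  · simp [h, pvD, hc]
  · simp [h]

theorem pv_rstrip_dash_cons {s : List Char} (hs : pvRstrip s ≠ []) :
    pvRstrip ('-' :: s) = '-' :: pvRstrip s := by
  unfold pvRstrip at *
  rw [List.reverse_cons, List.dropWhile_append]
  by_cases h : List.dropWhile pvD s.reverse = []
  · exact absurd (by simp [h]) hs
  · simp [h]

theorem pv_rstrip_ne_cons {c : Char} (hc : c ≠ '-') (s : List Char) :
    pvRstrip (c :: s) ≠ [] := by
  rw [pv_rstrip_cons hc]; simp

theorem pv_aside (t : List Char) :
    (pvRstrip (pvSquash false t) = pvRef false true t) ∧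
    (pvRstrip ('-' :: pvSquash true t) = pvRef true true t) ∧
    (pvRstrip (pvSquash true t) = pvRef true false t) := by
  induction t with
  | nil =>
    refine ⟨?_, ?_, ?_⟩ <;> simp [pvSquash, pvRef, pvRstrip, pvD]
  | cons c t ih =>
    obtain ⟨ih1, ih2, ih3⟩ := ih
    by_cases hc : c = '-'
    · subst hc
      refine ⟨?_, ?_, ?_⟩
      · simp only [pvSquash, Bool.false_eq_true, if_false, pvRef]
        exact ih2
      · simp only [pvSquash, pvRef]
        exact ih2
      · simp only [pvSquash, pvRef]
        exact ih3
    · refine ⟨?_, ?_, ?_⟩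
      · rw [show pvSquash false (c :: t) = c :: pvSquash false t by simp [pvSquash, hc]]
        rw [pv_rstrip_cons hc, ih1]
        simp [pvRef, hc]
      · rw [show pvSquash true (c :: t) = c :: pvSquash false t by simp [pvSquash, hc]]
        rw [pv_rstrip_dash_cons (pv_rstrip_ne_cons hc _), pv_rstrip_cons hc, ih1]
        simp [pvRef, hc]
      · rw [show pvSquash true (c :: t) = c :: pvSquash false t by simp [pvSquash, hc]]
        rw [pv_rstrip_cons hc, ih1]
        simp [pvRef, hc]

theorem pv_lstrip_squash_true (t : List Char) :
    List.dropWhile pvD (pvSquash true t) = pvSquash true t := by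
  induction t with
  | nil => simp [pvSquash]
  | cons c t ih =>
    by_cases hc : c = '-'
    · subst hc; simpa [pvSquash] using ih
    · simp [pvSquash, hc, pvD]

theorem pv_stripChars_eq (s : List Char) :
    PySem.Chars.stripChars s ['-'] = pvRstrip (List.dropWhile pvD s) := rfl

theorem pv_atop (t : List Char) :
    PySem.Chars.stripChars (pvSquash false t) ['-'] = pvRef false false t := by
  rw [pv_stripChars_eq]
  cases t with
  | nil => simp [pvSquash, pvRef, pvRstrip]
  | cons c t =>
    by_cases hc : c = '-'
    · subst hc
      rw [show pvSquash false ('-' :: t) = '-' :: pvSquash true t by simp [pvSquash]]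
      rw [show pvRef false false ('-' :: t) = pvRef true false t by simp [pvRef]]
      rw [show List.dropWhile pvD ('-' :: pvSquash true t) = List.dropWhile pvD (pvSquash true t) by
        simp [pvD]]
      rw [pv_lstrip_squash_true]
      exact (pv_aside t).2.2
    · rw [show pvSquash false (c :: t) = c :: pvSquash false t by simp [pvSquash, hc]]
      rw [show List.dropWhile pvD (c :: pvSquash false t) = c :: pvSquash false t by
        simp [pvD, hc]]
      rw [pv_rstrip_cons hc, (pv_aside t).1]
      simp [pvRef, hc]

-- ---- B side (classification → whitespace split → reference machine) ----

theorem pv_msplit_acc (t : List Char) : ∀ (cur : List Char),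
    pvMsplit t cur = (cur.reverse ++ (pvMsplit t []).headI) :: (pvMsplit t []).tail := by
  induction t with
  | nil => intro cur; simp [pvMsplit]
  | cons c t ih =>
    intro cur
    by_cases hc : c = '-'
    · subst hc; simp [pvMsplit]
    · simp only [pvMsplit, hc, if_false]
      rw [ih (c :: cur), ih [c]]
      simp

theorem pv_intercalate (x : List Char) (l : List (List Char)) :
    List.intercalate ['-'] (x :: l) = x ++ (l.map (fun w => '-' :: w)).flatten := by
  induction l generalizing x with
  | nil => simp [List.intercalate]
  | cons y l ih =>
    rw [show List.intercalate ['-'] (x :: y :: l) = x ++ ['-'] ++ List.intercalate ['-'] (y :: l) by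
      simp [List.intercalate, List.intersperse]]
    rw [ih y]
    simp

theorem pv_bside (t : List Char) :
    (∀ pend : Bool, pvRef pend false t = List.intercalate ['-'] ((pvMsplit t []).filter (fun p => p ≠ []))) ∧
    (∀ h tl, pvMsplit t [] = h :: tl → pvRef false true t = h ++ pvJ tl) ∧
    (pvRef true true t = pvJ (pvMsplit t [])) := by
  induction t with
  | nil =>
    refine ⟨fun pend => ?_, fun h tl he => ?_, ?_⟩
    · simp [pvRef, pvMsplit, List.intercalate]
    · simp only [pvMsplit] at he
      cases he
      simp [pvRef, pvJ]
    · simp [pvRef, pvMsplit, pvJ]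
  | cons c t ih =>
    obtain ⟨ih1, ih2, ih3⟩ := ih
    by_cases hc : c = '-'
    · subst hc
      refine ⟨fun pend => ?_, fun h tl he => ?_, ?_⟩
      · simp only [pvRef, pvMsplit]
        rw [ih1 true]
        simp
      · simp only [pvMsplit] at he
        cases he
        simp only [pvRef]
        rw [ih3]
        simp
      · simp only [pvRef, pvMsplit]
        rw [ih3]
        simp [pvJ]
    · have hsplit : pvMsplit (c :: t) [] = (c :: (pvMsplit t []).headI) :: (pvMsplit t []).tail := by
        simp only [pvMsplit, hc, if_false]
        rw [pv_msplit_acc t [c]]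
        simp
      have hmt : pvMsplit t [] = (pvMsplit t []).headI :: (pvMsplit t []).tail := by
        rw [pv_msplit_acc t []]; simp
      refine ⟨fun pend => ?_, fun h tl he => ?_, ?_⟩
      · simp only [pvRef, hc, if_false, Bool.and_false]
        rw [hsplit]
        simp only [List.filter_cons, ne_eq, List.cons_ne_nil, not_false_eq_true, decide_true,
          if_pos]
        rw [pv_intercalate]
        rw [ih2 _ _ hmt]
        simp [pvJ]
      · rw [hsplit] at he
        cases he
        simp only [pvRef, hc, if_false, Bool.false_and]
        rw [ih2 _ _ hmt]
        simp
      · simp only [pvRef, hc, if_false, Bool.and_self]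
        rw [hsplit]
        simp only [pvJ, List.filter_cons, ne_eq, List.cons_ne_nil, not_false_eq_true,
          decide_true, if_pos, List.map_cons, List.flatten_cons]
        rw [ih2 _ _ hmt]
        simp [pvJ]

-- split₀.go is pvW with an accumulator of finished words
theorem pv_go0 (t : List Char) : ∀ (cur : List Char) (acc : List (List Char)),
    PySem.Chars.split₀.go t cur acc = acc.reverse ++ pvW t cur := by
  induction t with
  | nil =>
    intro cur acc
    by_cases hc : cur = [] <;> simp [PySem.Chars.split₀.go, pvW, hc]
  | cons c t ih =>
    intro cur acc
    by_cases hs : PySem.Chars.isspace c = true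
    · by_cases hc : cur = []
      · subst hc
        simp [PySem.Chars.split₀.go, pvW, hs, ih]
      · rw [show PySem.Chars.split₀.go (c :: t) cur acc
              = PySem.Chars.split₀.go t [] (cur.reverse :: acc) by
            simp [PySem.Chars.split₀.go, hs, List.isEmpty_iff, hc]]
        rw [ih]
        simp [pvW, hs, hc]
    · rw [show PySem.Chars.split₀.go (c :: t) cur acc = PySem.Chars.split₀.go t (c :: cur) acc by
          simp [PySem.Chars.split₀.go, hs]]
      rw [ih]
      simp [pvW, hs]

theorem pv_split₀_eq (t : List Char) : PySem.Chars.split₀ t = pvW t [] := by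
  unfold PySem.Chars.split₀
  rw [pv_go0]
  simp

-- pvW swallows an all-whitespace suffix / prefix
theorem pv_W_spaces (sp : List Char) (hsp : ∀ c ∈ sp, PySem.Chars.isspace c = true) :
    ∀ cur, pvW sp cur = if cur = [] then [] else [cur.reverse] := by
  induction sp with
  | nil => intro cur; simp [pvW]
  | cons c sp ih =>
    intro cur
    have hc := hsp c (by simp)
    have ih' := ih (fun d hd => hsp d (by simp [hd]))
    by_cases hcur : cur = [] <;> simp [pvW, hc, hcur, ih']

theorem pv_W_append_spaces (x sp : List Char) (hsp : ∀ c ∈ sp, PySem.Chars.isspace c = true) :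
    ∀ cur, pvW (x ++ sp) cur = pvW x cur := by
  induction x with
  | nil =>
    intro cur
    rw [List.nil_append, pv_W_spaces sp hsp]
    by_cases hcur : cur = [] <;> simp [pvW, hcur]
  | cons c x ih =>
    intro cur
    by_cases hs : PySem.Chars.isspace c = true
    · by_cases hcur : cur = [] <;> simp [pvW, hs, hcur, ih]
    · simp [pvW, hs, ih]

theorem pv_W_prepend_spaces (sp x : List Char) (hsp : ∀ c ∈ sp, PySem.Chars.isspace c = true) :
    pvW (sp ++ x) [] = pvW x [] := by
  induction sp with
  | nil => simp
  | cons c sp ih =>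
    have hc := hsp c (by simp)
    rw [List.cons_append]
    rw [show pvW (c :: (sp ++ x)) [] = pvW (sp ++ x) [] by simp [pvW, hc]]
    exact ih (fun d hd => hsp d (by simp [hd]))

-- B's classification is A's transformed stream with dashes renamed to spaces
theorem pv_cl_char (c : Char) : (pvCl c).toList = (pvTr c).map pvSig := by
  unfold pvCl pvTr
  cases ha : PySem.Chars.isalnum c
  · cases hs : (['-', '_', '.', ' ', '/'].contains c)
    · simp
    · simp [pvSig]
  · simp [pvSig, pv_alnum_ne_dash ha]

theorem pv_filterMap_cl (l : List Char) :
    l.filterMap pvCl = (l.flatMap pvTr).map pvSig := by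
  induction l with
  | nil => simp
  | cons c l ih =>
    rw [List.flatMap_cons, List.map_append, ← pv_cl_char, ← ih]
    cases h : pvCl c <;> simp [h]

theorem pv_tr_mem {c d : Char} (h : d ∈ pvTr c) : d = '-' ∨ PySem.Chars.isalnum d = true := by
  unfold pvTr at h
  cases ha : PySem.Chars.isalnum c <;> rw [ha] at h
  · cases hs : (['-', '_', '.', ' ', '/'].contains c) <;> rw [hs] at h
    · simp at h
    · simp at h; subst h; exact Or.inl rfl
  · simp at h; subst h; exact Or.inr ha

-- whitespace-splitting the renamed stream = dash-splitting the stream, empty parts dropped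
theorem pv_WM (u : List Char) (hu : ∀ c ∈ u, c = '-' ∨ PySem.Chars.isalnum c = true) :
    ∀ cur, pvW (u.map pvSig) cur = (pvMsplit u cur).filter (fun p => p ≠ []) := by
  induction u with
  | nil =>
    intro cur
    by_cases hc : cur = [] <;> simp [pvW, pvMsplit, hc]
  | cons c u ih =>
    intro cur
    have ih' := ih (fun d hd => hu d (by simp [hd]))
    have hsp : PySem.Chars.isspace ' ' = true := by decide
    rcases hu c (by simp) with hc | hc
    · subst hc
      simp only [List.map_cons]
      rw [show pvSig '-' = ' ' from rfl]
      by_cases hcur : cur = []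
      · subst hcur
        rw [show pvW (' ' :: List.map pvSig u) [] = pvW (List.map pvSig u) [] by
          simp [pvW, hsp]]
        rw [show pvMsplit ('-' :: u) [] = ([] : List Char).reverse :: pvMsplit u [] by
          simp [pvMsplit]]
        rw [ih' []]
        simp
      · rw [show pvW (' ' :: List.map pvSig u) cur = cur.reverse :: pvW (List.map pvSig u) [] by
          simp [pvW, hsp, hcur]]
        rw [show pvMsplit ('-' :: u) cur = cur.reverse :: pvMsplit u [] by simp [pvMsplit]]
        rw [ih' []]
        simp [hcur]
    · have hnd : c ≠ '-' := pv_alnum_ne_dash hc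
      simp only [List.map_cons]
      rw [show pvSig c = c by simp [pvSig, hnd]]
      rw [show pvW (c :: List.map pvSig u) cur = pvW (List.map pvSig u) (c :: cur) by
        simp [pvW, pv_alnum_not_space hc]]
      rw [show pvMsplit (c :: u) cur = pvMsplit u (c :: cur) by simp [pvMsplit, hnd]]
      exact ih' (c :: cur)

theorem pv_spaces_filter {l : List Char} (hl : ∀ c ∈ l, PySem.Chars.isspace c = true) :
    ∀ x ∈ l.filterMap pvCl, PySem.Chars.isspace x = true := by
  intro x hx
  rw [List.mem_filterMap] at hx
  obtain ⟨c, hc, hcx⟩ := hx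
  rcases pv_cl_space (hl c hc) with h | h <;> rw [h] at hcx
  · cases hcx
  · cases hcx; decide

theorem pv_lower_spaces {l : List Char} (hl : ∀ c ∈ l, PySem.Chars.isspace c = true) :
    PySem.Chars.lower l = l := by
  unfold PySem.Chars.lower
  exact List.map_congr_left (fun c hc => pv_space_lower (hl c hc)) |>.trans l.map_id

-- the main identity between the two normalized strings
theorem pv_main (t : List Char) :
    PySem.Chars.stripChars
      (((PySem.Chars.lower (PySem.Chars.strip t)).foldl (fun (st : List Char × Bool) char =>
        if PySem.Chars.isalnum char then (st.1 ++ [char], false)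
        else if (['-', '_', '.', ' ', '/'].contains char && !st.2) then (st.1 ++ ['-'], true)
        else st) ([], false)).1) ['-']
    = PySem.Chars.join ['-']
        (PySem.Chars.split₀ ((PySem.Chars.lower t).filterMap (fun c =>
          if PySem.Chars.isalnum c then some c
          else if ['-', '_', '.', ' ', '/'].contains c then some ' ' else none))) := by
  -- name the three pieces of t: leading spaces, stripped middle, trailing spaces
  set p := t.takeWhile PySem.Chars.isspace with hp
  set q := t.dropWhile PySem.Chars.isspace with hq
  set m := PySem.Chars.strip t with hm
  set s2 := (q.reverse.takeWhile PySem.Chars.isspace).reverse with hs2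
  have hqm : q = m ++ s2 := by
    have h1 : q.reverse.takeWhile PySem.Chars.isspace ++ q.reverse.dropWhile PySem.Chars.isspace
        = q.reverse := List.takeWhile_append_dropWhile
    have h2 := congrArg List.reverse h1
    rw [List.reverse_append, List.reverse_reverse] at h2
    rw [hm]
    exact h2.symm
  have ht : t = p ++ m ++ s2 := by
    rw [List.append_assoc, ← hqm, hp, hq, List.takeWhile_append_dropWhile]
  have hpsp : ∀ c ∈ p, PySem.Chars.isspace c = true := fun c hc => List.mem_takeWhile_imp hc
  have hssp : ∀ c ∈ s2, PySem.Chars.isspace c = true := by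
    intro c hc
    rw [hs2, List.mem_reverse] at hc
    exact List.mem_takeWhile_imp hc
  -- rewrite B's pipeline
  conv_rhs => rw [ht]
  rw [show (fun c =>
        if PySem.Chars.isalnum c then some c
        else if ['-', '_', '.', ' ', '/'].contains c then some ' ' else none) = pvCl from rfl]
  rw [show PySem.Chars.lower (p ++ m ++ s2)
      = PySem.Chars.lower p ++ PySem.Chars.lower m ++ PySem.Chars.lower s2 by
    simp [PySem.Chars.lower]]
  rw [List.filterMap_append, List.filterMap_append]
  rw [pv_lower_spaces hpsp, pv_lower_spaces hssp]
  rw [pv_split₀_eq, List.append_assoc]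
  rw [pv_W_prepend_spaces _ _ (pv_spaces_filter hpsp)]
  rw [pv_W_append_spaces _ _ (pv_spaces_filter hssp)]
  rw [pv_filterMap_cl]
  rw [pv_WM _ (fun c hc => by
    rw [List.mem_flatMap] at hc
    obtain ⟨d, _, hd⟩ := hc
    exact pv_tr_mem hd)]
  simp only [PySem.Chars.join]
  rw [← ((pv_bside ((PySem.Chars.lower m).flatMap pvTr)).1 false)]
  rw [pv_fold, List.nil_append, pv_atop]

-- ===== VERDICT (by name: the statement is the Claim_ definition above) =====
theorem sanitize_alias_prefix_spec : Claim_equal_sanitize_alias_prefix := by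
  intro value _ _
  unfold Spec_sanitize_alias_prefix
  simp only [sanitize_alias_prefix, sanitize_alias_prefix_alt]
  rw [pv_main]
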